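-- pv_equiv track=rewrite | github.com/notsoocool/travel_buddy | backend/agents/destination_agent.py | post_process_destinations
-- ===== SOURCE A (Python) =====
-- FALLBACK_DESTINATIONS = ["Japan", "Peru", "Canada", "Nepal", "Morocco", "Australia"]
--
-- def post_process_destinations(output):
--     destinations = [d.strip() for d in output.replace("\n", ",").split(",") if d.strip()]
--     unique_destinations = []
--     for d in destinations:
--         if d.lower() not in [u.lower() for u in unique_destinations]:
--             unique_destinations.append(d)
--         if len(unique_destinations) == 5:
--             break
--     for fallback in FALLBACK_DESTINATIONS:
--         if len(unique_destinations) == 5: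
--             break
--         if fallback.lower() not in [u.lower() for u in unique_destinations]:
--             unique_destinations.append(fallback)
--     return ", ".join(unique_destinations)
-- ===== SOURCE B (Python) =====
-- FALLBACK_DESTINATIONS = ["Japan", "Peru", "Canada", "Nepal", "Morocco", "Australia"]
--
-- def post_process_destinations(output):
--     items = [d.strip() for d in output.replace("\n", ",").split(",") if d.strip()] + FALLBACK_DESTINATIONS
--
--     def keep(xs):
--         if not xs:
--             return []
--         head = xs[0]
--         return [head] + keep([x for x in xs[1:] if x.lower() != head.lower()])
--
--     return ", ".join(keep(items)[:5])
-- ===== Notes on version B (the rewrite author's own statement) =====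
-- stated objective: alternative
-- what changed: Replaces A's two break-at-5 loops that each test membership in a rebuilt lowercased seen-list with a recursive filter-forward dedupe: keep the head and delete its later case-insensitive duplicates from the remainder, over the input chained with the fallbacks, capping to 5 only once at the end.
import Mathlib
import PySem

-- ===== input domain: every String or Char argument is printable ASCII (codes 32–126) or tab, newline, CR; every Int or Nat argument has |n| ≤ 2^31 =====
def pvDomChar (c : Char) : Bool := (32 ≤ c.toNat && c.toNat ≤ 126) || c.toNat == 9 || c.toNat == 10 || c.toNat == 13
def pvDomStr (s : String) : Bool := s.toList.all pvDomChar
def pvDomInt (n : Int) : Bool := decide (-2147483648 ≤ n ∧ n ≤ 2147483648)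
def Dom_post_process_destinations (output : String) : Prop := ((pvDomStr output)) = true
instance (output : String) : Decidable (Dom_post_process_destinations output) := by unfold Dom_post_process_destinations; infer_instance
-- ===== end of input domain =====

-- B replaces A's two break-at-5 seen-list-membership loops with a recursive filter-forward dedupe
-- (keep the head, delete its later case-insensitive duplicates, recurse), capping to 5 once at the end.

-- ===== PORT A =====
def FALLBACK_DESTINATIONS : List String := ["Japan", "Peru", "Canada", "Nepal", "Morocco", "Australia"]

-- first loop of A: dedupe the parsed destinations, breaking once 5 are kept
def ppdLoop1 : List String → List String → List String
  | [], u => u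
  | d :: ds, u =>
    let u' := if (u.map PySem.Str.lower).contains (PySem.Str.lower d) then u else u ++ [d]
    if u'.length == 5 then u' else ppdLoop1 ds u'

-- second loop of A: top up from the fallbacks, breaking at 5 at the top of each iteration
def ppdLoop2 : List String → List String → List String
  | [], u => u
  | f :: fs, u =>
    if u.length == 5 then u
    else ppdLoop2 fs (if (u.map PySem.Str.lower).contains (PySem.Str.lower f) then u else u ++ [f])

def post_process_destinations (output : String) : String :=
  let destinations :=
    ((PySem.Str.replace output "\n" ",").splitOn ",").filterMap
      (fun d => if PySem.Str.strip d = "" then none else some (PySem.Str.strip d))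
  PySem.Str.join ", " (ppdLoop2 FALLBACK_DESTINATIONS (ppdLoop1 destinations []))

-- ===== PORT B =====
-- Source B's `keep`: keep the head, filter its later case-insensitive duplicates out of the rest, recurse
def ppdKeep (xs : List String) : List String :=
  match xs with
  | [] => []
  | head :: rest =>
      head :: ppdKeep (rest.filter (fun x => !(PySem.Str.lower x == PySem.Str.lower head)))
termination_by xs.length
decreasing_by
  have h1 := List.length_filter_le (fun x => !PySem.Str.lower x.1 == PySem.Str.lower head) rest.attach
  simp at h1 ⊢
  omega

def post_process_destinations_alt (output : String) : String :=
  let items :=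
    (((PySem.Str.replace output "\n" ",").splitOn ",").filterMap
      (fun d => if PySem.Str.strip d = "" then none else some (PySem.Str.strip d)))
      ++ FALLBACK_DESTINATIONS
  PySem.Str.join ", " ((ppdKeep items).take 5)

-- ===== PRECONDITION & SPEC =====
def Spec_post_process_destinations (output : String) (out : String) : Prop := out = post_process_destinations_alt output
instance (output : String) (out : String) : Decidable (Spec_post_process_destinations output out) := by unfold Spec_post_process_destinations; infer_instance

-- ===== CLAIM (what is proved, stated in full; the proofs are below) =====
def Claim_equal_post_process_destinations : Prop := ∀ (output : String), Dom_post_process_destinations output → Spec_post_process_destinations output (post_process_destinations output)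

-- ===== LEMMAS AND PROOFS =====

-- first-occurrence dedup by lowercase, relative to the already-kept list u (uncapped shape of A's loops)
def ddl : List String → List String → List String
  | _, [] => []
  | u, x :: xs =>
    if (u.map PySem.Str.lower).contains (PySem.Str.lower x) then ddl u xs
    else x :: ddl (u ++ [x]) xs

-- strip-and-drop-empties (the shared parsing comprehension)
def sstrip (L : List String) : List String :=
  L.filterMap (fun d => if PySem.Str.strip d = "" then none else some (PySem.Str.strip d))

theorem ppdLoop2_stop (xs u) (h : u.length = 5) : ppdLoop2 xs u = u := by
  cases xs <;> simp [ppdLoop2, h]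

theorem ppdLoop1_eq_loop2 (ds : List String) (u : List String) (h : u.length < 5) :
    ppdLoop1 ds u = ppdLoop2 ds u := by
  induction ds generalizing u with
  | nil => simp [ppdLoop1, ppdLoop2]
  | cons d ds ih =>
    simp only [ppdLoop1, ppdLoop2]
    have hne : (u.length == 5) = false := by simp; omega
    by_cases hm : (u.map PySem.Str.lower).contains (PySem.Str.lower d)
    · simp only [hm, if_true, hne, Bool.false_eq_true, if_false]
      exact ih u h
    · simp only [hm, Bool.false_eq_true, if_false, hne]
      by_cases h5 : (u ++ [d]).length = 5
      · simp [ppdLoop2_stop _ _ h5]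
        intro h4
        exact absurd (by simp at h5; omega) h4
      · have h5' : ((u ++ [d]).length == 5) = false := by simp_all
        simp only [h5', Bool.false_eq_true, if_false]
        exact ih (u ++ [d]) (by simp at h5 ⊢; omega)

theorem ppdLoop2_append (xs ys u : List String) :
    ppdLoop2 (xs ++ ys) u = ppdLoop2 ys (ppdLoop2 xs u) := by
  induction xs generalizing u with
  | nil => simp [ppdLoop2]
  | cons x xs ih =>
    simp only [List.cons_append, ppdLoop2]
    by_cases h5 : u.length = 5
    · simp [h5, ppdLoop2_stop _ _ h5]
    · have hne : (u.length == 5) = false := by simp_all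
      simp only [hne, Bool.false_eq_true, if_false]
      exact ih _

theorem ppdLoop2_eq_ddl (xs : List String) (u : List String) (h : u.length ≤ 5) :
    ppdLoop2 xs u = (u ++ ddl u xs).take 5 := by
  induction xs generalizing u with
  | nil =>
    simp only [ppdLoop2, ddl, List.append_nil]
    exact (List.take_of_length_le h).symm
  | cons x xs ih =>
    simp only [ppdLoop2, ddl]
    by_cases h5 : u.length = 5
    · simp only [h5, beq_self_eq_true, if_true]
      rw [List.take_append_of_le_length (by omega), List.take_of_length_le (by omega)]
    · have hne : (u.length == 5) = false := by simp_all
      simp only [hne, Bool.false_eq_true, if_false]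
      by_cases hm : (u.map PySem.Str.lower).contains (PySem.Str.lower x)
      · simp only [hm, if_true]
        exact ih u h
      · simp only [hm, Bool.false_eq_true, if_false]
        rw [ih (u ++ [x]) (by simp; omega)]
        simp [List.append_assoc]

-- ddl u is the filter-forward dedupe of the sublist surviving u's lowercase filter
theorem ddl_eq_ppdKeep_filter (xs : List String) (u : List String) :
    ddl u xs = ppdKeep (xs.filter (fun x => !((u.map PySem.Str.lower).contains (PySem.Str.lower x)))) := by
  induction xs generalizing u with
  | nil => simp [ddl, ppdKeep]
  | cons x xs ih =>
    simp only [ddl, List.filter_cons]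
    by_cases hm : (u.map PySem.Str.lower).contains (PySem.Str.lower x)
    · simp only [hm, if_true, Bool.not_true, Bool.false_eq_true, if_false]
      exact ih u
    · simp only [hm, Bool.false_eq_true, if_false, Bool.not_false, if_true]
      rw [ppdKeep, List.filter_filter]
      rw [ih (u ++ [x])]
      congr 1
      congr 1
      apply List.filter_congr
      intro y _
      simp only [List.map_append, List.map_cons, List.map_nil, List.contains_append]
      cases hxy : (PySem.Str.lower y == PySem.Str.lower x) <;>
        cases hu : (u.map PySem.Str.lower).contains (PySem.Str.lower y) <;>
        simp_all [List.contains_cons]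

theorem ddl_nil_eq_ppdKeep (xs : List String) : ddl [] xs = ppdKeep xs := by
  rw [ddl_eq_ppdKeep_filter]
  congr 1
  simp

-- ===== VERDICT (by name: the statement is the Claim_ definition above) =====
theorem post_process_destinations_spec : Claim_equal_post_process_destinations := by
  intro output _
  unfold Spec_post_process_destinations post_process_destinations post_process_destinations_alt
  simp only []
  set parts := (PySem.Str.replace output "\n" ",").splitOn "," with hparts
  have hA : ppdLoop2 FALLBACK_DESTINATIONS (ppdLoop1 (sstrip parts) []) =
      (ddl [] (sstrip parts ++ FALLBACK_DESTINATIONS)).take 5 := by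
    rw [ppdLoop1_eq_loop2 _ _ (by simp), ← ppdLoop2_append,
      ppdLoop2_eq_ddl _ _ (by simp)]
    simp
  rw [show parts.filterMap
      (fun d => if PySem.Str.strip d = "" then none else some (PySem.Str.strip d)) = sstrip parts from rfl,
    hA, ddl_nil_eq_ppdKeep]
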